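-- pv_equiv track=rewrite | github.com/ChrisHenryOC/let_it_ride | src/let_it_ride/core/hand_analysis.py | _analyze_straight_potential
-- ===== SOURCE A (Python) =====
-- from collections.abc import Sequence
--
-- def _analyze_straight_potential(
--     rank_values: Sequence[int],
-- ) -> tuple[int, int, bool, bool]:
--     """Analyze straight draw potential for a set of rank values.
--
--     Args:
--         rank_values: Sequence of rank values (2-14).
--
--     Returns:
--         Tuple of (connected_cards, gaps, is_open_ended, is_inside_draw).
--         - connected_cards: Cards in best potential straight window
--         - gaps: Number of gaps in the best potential straight
--         - is_open_ended: True if 4 consecutive cards (open-ended draw)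
--         - is_inside_draw: True if 4 cards with 1 internal gap (gutshot)
--     """
--     if len(rank_values) < 3:
--         return 0, 0, False, False
--
--     unique_values = sorted(set(rank_values))
--
--     # Build list of value sets to try (regular + ace-low if applicable)
--     value_sets = [unique_values]
--
--     # Handle Ace-low: if we have ace and low cards, also try ace as 1
--     has_ace = 14 in unique_values
--     has_low_cards = any(v <= 5 for v in unique_values if v != 14)
--
--     if has_ace and has_low_cards:
--         # Create version with ace as 1 instead of 14
--         ace_low_values = sorted([1 if v == 14 else v for v in unique_values])
--         value_sets.append(ace_low_values)
--
--     best_connected = 1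
--     best_gaps = 4  # Start with max gaps
--     is_open_ended = False
--     is_inside = False
--
--     for values in value_sets:
--         n = len(values)
--         if n < 3:
--             continue
--
--         # Try all possible 5-card straight windows
--         # Windows: 1-5, 2-6, 3-7, ..., 10-14
--         for window_low in range(1, 11):
--             window_high = window_low + 4
--
--             # Count cards in this window
--             cards_in_window = [v for v in values if window_low <= v <= window_high]
--             num_cards = len(cards_in_window)
--
--             if num_cards < 3:
--                 continue
--
--             num_gaps = 5 - num_cards
--
--             # Update best if this window is better
--             if num_cards > best_connected or (
--                 num_cards == best_connected and num_gaps < best_gaps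
--             ):
--                 best_connected = num_cards
--                 best_gaps = num_gaps
--
--                 # Determine draw type for 4-card hands
--                 if num_cards == 4 and len(rank_values) >= 4:
--                     sorted_window = sorted(cards_in_window)
--                     # Check if 4 cards are consecutive
--                     consecutive = (sorted_window[-1] - sorted_window[0] == 3)
--
--                     if consecutive:
--                         # 4 consecutive cards
--                         min_val = sorted_window[0]
--                         max_val = sorted_window[-1]
--                         # Open-ended: can complete on either end
--                         # Not open-ended if at edge (A-2-3-4 or J-Q-K-A)
--                         can_go_low = min_val > 1  # Can add card below
--                         can_go_high = max_val < 14  # Can add card above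
--
--                         # Special case: A-2-3-4 (ace low) can only go high (5)
--                         if min_val == 1 and max_val == 4:
--                             can_go_low = False
--                             can_go_high = True
--
--                         is_open_ended = can_go_low and can_go_high
--                         is_inside = not is_open_ended
--                     else:
--                         # Gap in the middle - inside draw (gutshot)
--                         is_inside = True
--                         is_open_ended = False
--
--     return best_connected, best_gaps, is_open_ended, is_inside
-- ===== SOURCE B (Python) =====
-- def _windows(candidate_lists):
--     """All 5-rank windows (lows 1..10) per candidate list, in order; each is a sorted sublist."""
--     return [[v for v in values if lo <= v <= lo + 4]
--             for values in candidate_lists for lo in range(1, 11)]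
--
--
-- def _best(windows):
--     """Max card count over windows holding at least 3 cards (0 if none)."""
--     return max((len(w) for w in windows if len(w) >= 3), default=0)
--
--
-- def _flags(hand_size, windows):
--     """(open_ended, inside) from the first window holding >= 4 cards, if it holds exactly 4."""
--     if hand_size < 4:
--         return False, False
--     first = next((w for w in windows if len(w) >= 4), None)
--     if first is None or len(first) != 4:
--         return False, False
--     if first[-1] - first[0] == 3:
--         open_ended = first[0] > 1 and first[-1] < 14
--         return open_ended, not open_ended
--     return False, True
--
--
-- def _analyze_straight_potential(rank_values):
--     if len(rank_values) < 3:
--         return 0, 0, False, False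
--
--     unique_values = sorted(set(rank_values))
--
--     candidate_lists = [unique_values]
--     has_ace = 14 in unique_values
--     has_low_cards = any(v <= 5 for v in unique_values if v != 14)
--     if has_ace and has_low_cards:
--         candidate_lists.append(sorted(1 if v == 14 else v for v in unique_values))
--
--     windows = _windows(candidate_lists)
--     best = _best(windows)
--     if best == 0:
--         return 1, 4, False, False
--     open_ended, inside = _flags(len(rank_values), windows)
--     return best, 5 - best, open_ended, inside
-- ===== Notes on version B (the rewrite author's own statement) =====
-- stated objective: alternative
-- what changed: A tracks (best, gaps, flags) by mutating a 4-tuple inside two nested loops, with the draw-type flags overwritten at each strict improvement; B first materialises the list of all window card-sets, then computes the best count as a declarative max, and derives the flags once, in closed form, from the first window holding >= 4 cards (which is provably the window whose update last touched A's flags).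
import Mathlib
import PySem

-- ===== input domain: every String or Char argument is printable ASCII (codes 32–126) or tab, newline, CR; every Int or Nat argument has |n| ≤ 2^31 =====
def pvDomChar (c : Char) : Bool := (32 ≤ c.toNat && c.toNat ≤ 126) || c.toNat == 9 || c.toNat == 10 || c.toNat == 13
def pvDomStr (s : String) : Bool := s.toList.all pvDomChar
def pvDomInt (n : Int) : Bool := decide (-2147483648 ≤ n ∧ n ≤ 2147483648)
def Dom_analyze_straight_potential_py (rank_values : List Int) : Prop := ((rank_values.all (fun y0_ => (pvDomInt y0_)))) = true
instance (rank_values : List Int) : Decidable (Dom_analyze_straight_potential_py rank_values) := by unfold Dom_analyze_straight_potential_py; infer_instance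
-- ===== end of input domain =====

-- B replaces A's in-loop mutation of (best, gaps, flags) by a declarative max over the window
-- card-sets plus a closed-form flag computation from the first window holding ≥ 4 cards
-- (objective: alternative decomposition, same asymptotic cost).

-- ===== PORT A =====
-- A-side helper: the body of A's inner window loop, over the computed card list (same steps).
def wstepA (L : Int) (st : Int × Int × Bool × Bool) (cards_in_window : List Int) :
    Int × Int × Bool × Bool :=
  let num_cards : Int := cards_in_window.length
  if num_cards < 3 then st
  else
    let num_gaps : Int := 5 - num_cards
    if num_cards > st.1 ∨ (num_cards = st.1 ∧ num_gaps < st.2.1) then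
      if num_cards = 4 ∧ 4 ≤ L then
        let sorted_window := PySem.List.sorted cards_in_window (fun v => v) false
        let min_val := (PySem.List.pyGet? sorted_window 0).getD 0
        let max_val := (PySem.List.pyGet? sorted_window (-1)).getD 0
        if max_val - min_val = 3 then
          let can_go_low := decide (min_val > 1)
          let can_go_high := decide (max_val < 14)
          let p : Bool × Bool :=
            if min_val = 1 ∧ max_val = 4 then (false, true) else (can_go_low, can_go_high)
          (num_cards, num_gaps, p.1 && p.2, !(p.1 && p.2))
        else
          (num_cards, num_gaps, false, true)
      else (num_cards, num_gaps, st.2.2.1, st.2.2.2)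
    else st

-- A-side helper: one iteration 'for window_low in range(1, 11)'.
def stepA (L : Int) (values : List Int) (st : Int × Int × Bool × Bool) (window_low : Int) :
    Int × Int × Bool × Bool :=
  let window_high := window_low + 4
  wstepA L st (values.filter (fun v => decide (window_low ≤ v) && decide (v ≤ window_high)))

def analyze_straight_potential_py (rank_values : List Int) : Int × Int × Bool × Bool :=
  if rank_values.length < 3 then (0, 0, false, false)
  else
    let unique_values := PySem.List.sorted (PySem.Set.ofList rank_values) (fun v => v) false
    let value_sets := [unique_values]
    let has_ace := unique_values.contains 14
    let has_low_cards :=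
      (unique_values.filter (fun v => decide (v ≠ 14))).any (fun v => decide (v ≤ 5))
    let value_sets :=
      if has_ace && has_low_cards then
        value_sets ++
          [PySem.List.sorted (unique_values.map (fun v => if v = 14 then 1 else v)) (fun v => v) false]
      else value_sets
    value_sets.foldl
      (fun st values =>
        if values.length < 3 then st
        else (PySem.List.pyRange 1 11 1).foldl (stepA (rank_values.length : Int) values) st)
      (1, 4, false, false)

-- ===== PORT B =====
-- B-side helper: _windows — all 5-rank windows (lows 1..10) per candidate list, in order.
def bWindows (candidate_lists : List (List Int)) : List (List Int) :=
  candidate_lists.flatMap (fun values =>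
    (PySem.List.pyRange 1 11 1).map (fun lo =>
      values.filter (fun v => decide (lo ≤ v) && decide (v ≤ lo + 4))))

-- B-side helper: _best — max card count over windows holding at least 3 cards (0 if none).
def bBest (windows : List (List Int)) : Int :=
  (PySem.List.max?
    ((windows.filter (fun w => decide (3 ≤ w.length))).map (fun w => (w.length : Int)))
    (fun x => x)).getD 0

-- B-side helper: _flags — (open_ended, inside) from the first window holding ≥ 4 cards.
def bFlags (hand_size : Int) (windows : List (List Int)) : Bool × Bool :=
  if hand_size < 4 then (false, false)
  else
    match windows.find? (fun w => decide (4 ≤ w.length)) with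
    | none => (false, false)
    | some first =>
      if first.length ≠ 4 then (false, false)
      else
        let lo := (PySem.List.pyGet? first 0).getD 0
        let hi := (PySem.List.pyGet? first (-1)).getD 0
        if hi - lo = 3 then
          let open_ended := decide (lo > 1) && decide (hi < 14)
          (open_ended, !open_ended)
        else (false, true)

def analyze_straight_potential_py_alt (rank_values : List Int) : Int × Int × Bool × Bool :=
  if rank_values.length < 3 then (0, 0, false, false)
  else
    let unique_values := PySem.List.sorted (PySem.Set.ofList rank_values) (fun v => v) false
    let candidate_lists := [unique_values]
    let has_ace := unique_values.contains 14
    let has_low_cards :=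
      (unique_values.filter (fun v => decide (v ≠ 14))).any (fun v => decide (v ≤ 5))
    let candidate_lists :=
      if has_ace && has_low_cards then
        candidate_lists ++
          [PySem.List.sorted (unique_values.map (fun v => if v = 14 then 1 else v)) (fun v => v) false]
      else candidate_lists
    let windows := bWindows candidate_lists
    let best := bBest windows
    if best = 0 then (1, 4, false, false)
    else
      let fl := bFlags (rank_values.length : Int) windows
      (best, 5 - best, fl.1, fl.2)

-- ===== PRECONDITION & SPEC =====
def Spec_analyze_straight_potential_py (rank_values : List Int) (out : Int × Int × Bool × Bool) : Prop := out = analyze_straight_potential_py_alt rank_values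
instance (rank_values : List Int) (out : Int × Int × Bool × Bool) : Decidable (Spec_analyze_straight_potential_py rank_values out) := by unfold Spec_analyze_straight_potential_py; infer_instance

-- ===== CLAIM (what is proved, stated in full; the proofs are below) =====
def Claim_equal_analyze_straight_potential_py : Prop := ∀ (rank_values : List Int), Dom_analyze_straight_potential_py rank_values → Spec_analyze_straight_potential_py rank_values (analyze_straight_potential_py rank_values)

-- ===== LEMMAS AND PROOFS =====

-- The flag pair computed from a (sorted) 4-card window.
def flagsW (w : List Int) : Bool × Bool :=
  let lo := (PySem.List.pyGet? w 0).getD 0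
  let hi := (PySem.List.pyGet? w (-1)).getD 0
  if hi - lo = 3 then
    (decide (lo > 1) && decide (hi < 14), !(decide (lo > 1) && decide (hi < 14)))
  else (false, true)

-- Running maximum of window card counts, starting from b.
def mfold (b : Int) (ws : List (List Int)) : Int :=
  ws.foldl (fun m w => max m (w.length : Int)) b

-- Final flag pair of A's fold started at best = b >= 3 with flags (oe, ins).
def Phi (L b : Int) (oe ins : Bool) (ws : List (List Int)) : Bool × Bool :=
  match ws.find? (fun w => decide (4 ≤ w.length)) with
  | some w => if b = 3 ∧ (w.length : Int) = 4 ∧ 4 ≤ L then flagsW w else (oe, ins)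
  | none => (oe, ins)

lemma wstep_eval (L b : Int) (oe ins : Bool) (w : List Int)
    (hw : w.Pairwise (fun a b : Int => a ≤ b)) :
    wstepA L (b, 5 - b, oe, ins) w =
      if (w.length : Int) < 3 ∨ (w.length : Int) ≤ b then (b, 5 - b, oe, ins)
      else ((w.length : Int), 5 - (w.length : Int),
        (if (w.length : Int) = 4 ∧ 4 ≤ L then flagsW w else (oe, ins)).1,
        (if (w.length : Int) = 4 ∧ 4 ≤ L then flagsW w else (oe, ins)).2) := by
  have hs : PySem.List.sorted w (fun v => v) false = w :=
    PySem.List.sorted_eq_self_of_pairwise w _ hw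
  simp only [wstepA, flagsW, hs]
  by_cases h1 : (w.length : Int) < 3
  · simp [h1]
  · by_cases h2 : (w.length : Int) ≤ b
    · have hc : ¬((w.length : Int) > b ∨ ((w.length : Int) = b ∧ 5 - (w.length : Int) < 5 - b)) := by
        omega
      simp [h1, h2]
    · have hc : ((w.length : Int) > b ∨ ((w.length : Int) = b ∧ 5 - (w.length : Int) < 5 - b)) := by
        omega
      simp only [if_neg h1, if_pos hc,
        if_neg (by omega : ¬((w.length : Int) < 3 ∨ (w.length : Int) ≤ b))]
      by_cases h4 : (w.length : Int) = 4 ∧ 4 ≤ L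
      · simp only [if_pos h4]
        set lo := (PySem.List.pyGet? w 0).getD 0 with hlo
        set hi := (PySem.List.pyGet? w (-1)).getD 0 with hhi
        by_cases h3 : hi - lo = 3
        · simp only [if_pos h3]
          by_cases h14 : lo = 1 ∧ hi = 4
          · simp [h14.1, h14.2]
          · simp [h14]
        · simp [h3]
      · simp [h4]

lemma Phi_of_ne3 (L b : Int) (oe ins : Bool) (ws : List (List Int)) (h : b ≠ 3) :
    Phi L b oe ins ws = (oe, ins) := by
  unfold Phi
  cases hf : ws.find? (fun w => decide (4 ≤ w.length)) with
  | none => rfl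
  | some w => simp [h]

lemma foldG (L : Int) (ws : List (List Int)) : ∀ (b : Int) (oe ins : Bool), 3 ≤ b →
    (∀ w ∈ ws, w.Pairwise (fun a b : Int => a ≤ b)) →
    ws.foldl (wstepA L) (b, 5 - b, oe, ins) =
      (mfold b ws, 5 - mfold b ws, (Phi L b oe ins ws).1, (Phi L b oe ins ws).2) := by
  induction ws with
  | nil => intro b oe ins hb hp; simp [mfold, Phi]
  | cons w ws ih =>
    intro b oe ins hb hp
    have hw := hp w (by simp)
    have hp' : ∀ x ∈ ws, x.Pairwise (fun a b : Int => a ≤ b) := fun x hx => hp x (by simp [hx])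
    rw [List.foldl_cons, wstep_eval L b oe ins w hw]
    by_cases h1 : (w.length : Int) < 3 ∨ (w.length : Int) ≤ b
    · rw [if_pos h1, ih b oe ins hb hp']
      have hm : mfold b (w :: ws) = mfold b ws := by
        simp only [mfold, List.foldl_cons]
        congr 1
        omega
      have hphi : Phi L b oe ins (w :: ws) = Phi L b oe ins ws := by
        by_cases h4 : 4 ≤ w.length
        · have hb3 : b ≠ 3 := by omega
          rw [Phi_of_ne3 L b oe ins ws hb3]
          have hfind : (w :: ws).find? (fun w => decide (4 ≤ w.length)) = some w :=
            List.find?_cons_of_pos (by simpa using h4)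
          simp only [Phi, hfind]
          rw [if_neg (by tauto)]
        · have hfind : (w :: ws).find? (fun w => decide (4 ≤ w.length))
              = ws.find? (fun w => decide (4 ≤ w.length)) :=
            List.find?_cons_of_neg (by simpa using h4)
          simp only [Phi, hfind]
      rw [hm, hphi]
    · rw [if_neg h1]
      have hc4 : 4 ≤ w.length := by omega
      rw [ih ((w.length : Int)) _ _ (by omega) hp']
      rw [Phi_of_ne3 L ((w.length : Int)) _ _ ws (by omega)]
      have hm : mfold b (w :: ws) = mfold ((w.length : Int)) ws := by
        simp only [mfold, List.foldl_cons]
        congr 1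
        omega
      have hphi : Phi L b oe ins (w :: ws)
          = (if (w.length : Int) = 4 ∧ 4 ≤ L then flagsW w else (oe, ins)) := by
        have hfind : (w :: ws).find? (fun w => decide (4 ≤ w.length)) = some w :=
          List.find?_cons_of_pos (by simpa using hc4)
        simp only [Phi, hfind]
        by_cases he : (w.length : Int) = 4 ∧ 4 ≤ L
        · rw [if_pos he, if_pos ⟨by omega, he⟩]
        · rw [if_neg he, if_neg (by tauto)]
      rw [hm, hphi]

lemma bBest_cons_lt (w : List Int) (ws : List (List Int)) (h : w.length < 3) :
    bBest (w :: ws) = bBest ws := by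
  simp [bBest, show ¬(3 ≤ w.length) by omega]

lemma bFlags_cons_lt (L : Int) (w : List Int) (ws : List (List Int)) (h : w.length < 4) :
    bFlags L (w :: ws) = bFlags L ws := by
  simp [bFlags, show ¬(4 ≤ w.length) by omega]

lemma foldmax_filter (ws : List (List Int)) : ∀ (b : Int), 3 ≤ b →
    (((ws.filter (fun w => decide (3 ≤ w.length))).map (fun w => (w.length : Int))).foldl max b)
      = mfold b ws := by
  induction ws with
  | nil => intro b _; simp [mfold]
  | cons w ws ih =>
    intro b hb
    by_cases h : 3 ≤ w.length
    · simp only [List.filter_cons, h, decide_true, if_pos, List.map_cons, List.foldl_cons]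
      rw [ih (max b (w.length : Int)) (by omega)]
      simp [mfold]
    · simp only [List.filter_cons, h, decide_false, if_neg, Bool.false_eq_true,
        not_false_iff]
      rw [ih b hb]
      simp only [mfold, List.foldl_cons]
      congr 1
      omega

lemma bBest_cons_ge (w : List Int) (ws : List (List Int)) (h : 3 ≤ w.length) :
    bBest (w :: ws) = mfold (w.length : Int) ws := by
  simp only [bBest, List.filter_cons, h, decide_true, if_pos, List.map_cons]
  rw [PySem.List.max?_id_cons]
  simp only [Option.getD_some]
  exact foldmax_filter ws _ (by omega)

lemma mfold_ge (ws : List (List Int)) (b : Int) : b ≤ mfold b ws := by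
  have : mfold b ws = (ws.map (fun w => (w.length : Int))).foldl max b := by
    rw [List.foldl_map]
    rfl
  rw [this]
  exact (PySem.List.le_foldl_max _ _).1

lemma Phi3_eq_bFlags (L : Int) (ws : List (List Int)) :
    Phi L 3 false false ws = bFlags L ws := by
  cases hf : ws.find? (fun w => decide (4 ≤ w.length)) with
  | none => simp [Phi, bFlags, hf]
  | some w =>
    have h4 : 4 ≤ w.length := by
      have := List.find?_some hf
      simpa using this
    simp only [Phi, bFlags, hf, true_and]
    by_cases hL : L < 4
    · rw [if_pos hL]
      rw [if_neg (by omega : ¬((w.length : Int) = 4 ∧ 4 ≤ L))]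
    · rw [if_neg hL]
      by_cases he : w.length = 4
      · rw [if_pos (by omega : (w.length : Int) = 4 ∧ 4 ≤ L)]
        rw [if_neg (by omega : ¬ w.length ≠ 4)]
        simp [flagsW]
      · rw [if_neg (by omega : ¬((w.length : Int) = 4 ∧ 4 ≤ L))]
        rw [if_pos (by omega : w.length ≠ 4)]

lemma masterFold (L : Int) : ∀ (ws : List (List Int)),
    (∀ w ∈ ws, w.Pairwise (fun a b : Int => a ≤ b)) →
    ws.foldl (wstepA L) (1, 4, false, false) =
      (if bBest ws = 0 then (1, 4, false, false)
       else (bBest ws, 5 - bBest ws, (bFlags L ws).1, (bFlags L ws).2)) := by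
  intro ws
  induction ws with
  | nil => intro _; simp [bBest, PySem.List.max?]
  | cons w ws ih =>
    intro h
    have hw := h w (by simp)
    have h' : ∀ x ∈ ws, x.Pairwise (fun a b : Int => a ≤ b) := fun x hx => h x (by simp [hx])
    have h41 : ((1 : Int), (4 : Int), false, false) = ((1 : Int), 5 - 1, false, false) := by
      norm_num
    rw [List.foldl_cons, h41, wstep_eval L 1 false false w hw]
    by_cases h1 : (w.length : Int) < 3 ∨ (w.length : Int) ≤ 1
    · have hc3 : w.length < 3 := by omega
      rw [if_pos h1, ← h41, ih h', bBest_cons_lt w ws hc3, bFlags_cons_lt L w ws (by omega)]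
    · rw [if_neg h1]
      have hc3 : 3 ≤ w.length := by omega
      rw [foldG L ws ((w.length : Int))
        ((if (w.length : Int) = 4 ∧ 4 ≤ L then flagsW w else (false, false)).1)
        ((if (w.length : Int) = 4 ∧ 4 ≤ L then flagsW w else (false, false)).2)
        (by omega) h']
      have hbb : bBest (w :: ws) = mfold ((w.length : Int)) ws := bBest_cons_ge w ws hc3
      have hne : bBest (w :: ws) ≠ 0 := by
        have := mfold_ge ws ((w.length : Int))
        omega
      rw [hbb, if_neg (by omega : ¬ mfold ((w.length : Int)) ws = 0)]
      by_cases hc4 : 4 ≤ w.length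
      · rw [Phi_of_ne3 L _ _ _ ws (by omega)]
        have hbf : bFlags L (w :: ws)
            = (if (w.length : Int) = 4 ∧ 4 ≤ L then flagsW w else (false, false)) := by
          have hfind : (w :: ws).find? (fun w => decide (4 ≤ w.length)) = some w :=
            List.find?_cons_of_pos (by simpa using hc4)
          simp only [bFlags, hfind]
          by_cases hL : L < 4
          · rw [if_pos hL, if_neg (by omega : ¬((w.length : Int) = 4 ∧ 4 ≤ L))]
          · rw [if_neg hL]
            by_cases he : w.length = 4
            · rw [if_neg (by omega : ¬ w.length ≠ 4),
                if_pos (by omega : (w.length : Int) = 4 ∧ 4 ≤ L)]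
              simp [flagsW]
            · rw [if_pos (by omega : w.length ≠ 4),
                if_neg (by omega : ¬((w.length : Int) = 4 ∧ 4 ≤ L))]
        rw [hbf]
      · have he3 : (w.length : Int) = 3 := by omega
        rw [he3, if_neg (by omega : ¬((3 : Int) = 4 ∧ 4 ≤ L))]
        rw [Phi3_eq_bFlags L ws, bFlags_cons_lt L w ws (by omega)]

lemma inner_to_windows (L : Int) (values : List Int) (st : Int × Int × Bool × Bool) :
    (if values.length < 3 then st
     else (PySem.List.pyRange 1 11 1).foldl (stepA L values) st)
      = ((PySem.List.pyRange 1 11 1).map (fun lo =>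
          values.filter (fun v => decide (lo ≤ v) && decide (v ≤ lo + 4)))).foldl
          (wstepA L) st := by
  rw [List.foldl_map]
  split_ifs with h
  · symm
    generalize (PySem.List.pyRange 1 11 1) = l
    induction l generalizing st with
    | nil => rfl
    | cons x l ihl =>
      rw [List.foldl_cons]
      have hid : wstepA L st (values.filter (fun v => decide (x ≤ v) && decide (v ≤ x + 4))) = st := by
        have hle := List.length_filter_le (fun v => decide (x ≤ v) && decide (v ≤ x + 4)) values
        unfold wstepA
        rw [if_pos (by omega)]
      rw [hid]
      exact ihl st
  · rfl

lemma assemble (L : Int) (cs : List (List Int))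
    (hcs : ∀ vs ∈ cs, vs.Pairwise (fun a b : Int => a ≤ b)) :
    cs.foldl
      (fun st values =>
        if values.length < 3 then st
        else (PySem.List.pyRange 1 11 1).foldl (stepA L values) st)
      (1, 4, false, false)
    = (if bBest (bWindows cs) = 0 then (1, 4, false, false)
       else (bBest (bWindows cs), 5 - bBest (bWindows cs),
             (bFlags L (bWindows cs)).1, (bFlags L (bWindows cs)).2)) := by
  have hfun : (fun (st : Int × Int × Bool × Bool) values =>
      if values.length < 3 then st
      else (PySem.List.pyRange 1 11 1).foldl (stepA L values) st)
    = (fun st values =>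
      ((PySem.List.pyRange 1 11 1).map (fun lo =>
        values.filter (fun v => decide (lo ≤ v) && decide (v ≤ lo + 4)))).foldl (wstepA L) st) := by
    funext st values
    exact inner_to_windows L values st
  rw [hfun, ← List.foldl_flatMap]
  have hwin : ∀ w ∈ bWindows cs, w.Pairwise (fun a b : Int => a ≤ b) := by
    intro w hw
    simp only [bWindows, List.mem_flatMap, List.mem_map] at hw
    obtain ⟨vs, hvs, lo, _, rfl⟩ := hw
    exact (hcs vs hvs).filter _
  exact masterFold L (bWindows cs) hwin

lemma ports_eq (rank_values : List Int) :
    analyze_straight_potential_py rank_values = analyze_straight_potential_py_alt rank_values := by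
  by_cases h : rank_values.length < 3
  · simp [analyze_straight_potential_py, analyze_straight_potential_py_alt, h]
  · simp only [analyze_straight_potential_py, analyze_straight_potential_py_alt, if_neg h]
    refine assemble ((rank_values.length : Int)) _ ?_
    intro vs hvs
    split at hvs
    · simp only [List.mem_append, List.mem_cons, List.not_mem_nil, or_false] at hvs
      rcases hvs with rfl | rfl <;> exact PySem.List.sorted_pairwise _ _
    · simp only [List.mem_cons, List.not_mem_nil, or_false] at hvs
      rcases hvs with rfl
      exact PySem.List.sorted_pairwise _ _
-- ===== VERDICT (by name: the statement is the Claim_ definition above) =====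
theorem analyze_straight_potential_py_spec : Claim_equal_analyze_straight_potential_py := by
  intro rank_values _
  unfold Spec_analyze_straight_potential_py
  exact ports_eq rank_values
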